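-- pv_equiv track=rewrite | github.com/joneswack/ocr-workbench | lighton_environment/run_experiment.py | resolve_pages
-- ===== SOURCE A (Python) =====
-- def resolve_pages(pages_spec, total_pages):
--     """Parse a page spec like '1', '1-3', '1,3,5' into a sorted list of 0-based indices."""
--     if pages_spec is None:
--         return list(range(total_pages))
--
--     indices = set()
--     for part in pages_spec.split(","):
--         part = part.strip()
--         if "-" in part:
--             start, end = part.split("-", 1)
--             indices.update(range(int(start) - 1, int(end)))
--         else:
--             indices.add(int(part) - 1)
--
--     return sorted(i for i in indices if 0 <= i < total_pages)
-- ===== SOURCE B (Python) =====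
-- def resolve_pages(pages_spec, total_pages):
--     """Parse a page spec like '1', '1-3', '1,3,5' into a sorted list of 0-based indices."""
--     if pages_spec is None:
--         return list(range(total_pages))
--
--     intervals = []
--     for part in pages_spec.split(","):
--         part = part.strip()
--         if "-" in part:
--             start, end = part.split("-", 1)
--             lo, hi = int(start) - 1, int(end)
--         else:
--             lo = int(part) - 1
--             hi = lo + 1
--         lo, hi = max(lo, 0), min(hi, total_pages)
--         if lo < hi:
--             intervals.append((lo, hi))
--
--     intervals.sort(key=lambda iv: iv[0])
--     result = []
--     cur = 0
--     for lo, hi in intervals: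
--         start = max(lo, cur)
--         if start < hi:
--             result.extend(range(start, hi))
--             cur = hi
--     return result
-- ===== Notes on version B (the rewrite author's own statement) =====
-- stated objective: alternative
-- what changed: B replaces A's accumulate-a-set-of-indices-then-filter-and-sort with interval merging: each part becomes one interval clamped to [0, total_pages), the non-empty intervals are sorted by start, and a single merging sweep emits the union, sorted and deduplicated by construction (no index set, no sort of indices).
import Mathlib
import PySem

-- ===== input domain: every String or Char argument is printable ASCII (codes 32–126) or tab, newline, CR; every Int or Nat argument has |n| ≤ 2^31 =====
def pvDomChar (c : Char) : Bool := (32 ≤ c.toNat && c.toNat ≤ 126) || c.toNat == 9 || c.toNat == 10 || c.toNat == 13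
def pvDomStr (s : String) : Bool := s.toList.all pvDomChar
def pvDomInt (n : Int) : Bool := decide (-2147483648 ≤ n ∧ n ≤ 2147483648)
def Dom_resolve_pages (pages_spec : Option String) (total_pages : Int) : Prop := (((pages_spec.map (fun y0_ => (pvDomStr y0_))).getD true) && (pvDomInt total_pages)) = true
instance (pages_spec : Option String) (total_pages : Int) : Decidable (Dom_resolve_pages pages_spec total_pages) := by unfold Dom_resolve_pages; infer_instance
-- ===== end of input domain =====

-- B replaces "accumulate a set of indices, then filter and sort" by collecting the parts'
-- clamped non-empty intervals, sorting them by start, and emitting the union in one merging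
-- sweep — sorted and deduplicated by construction, no index set, no sort of indices.

-- ===== PORT A =====
-- one loop iteration of A: add one part's indices to the set
def pvStepA (indices : PySem.Set Int) (part : String) : PySem.Set Int :=
  let part := PySem.Str.strip part
  if PySem.Str.isIn "-" part then
    match (PySem.Str.splitMax? part "-" 1).getD [] with
    | [start, end_] =>
        PySem.Set.update indices
          (PySem.List.pyRange ((PySem.Int.ofStr? start).getD 0 - 1) ((PySem.Int.ofStr? end_).getD 0) 1)
    | _ => indices        -- unreachable: split("-",1) on a string containing "-" has exactly 2 pieces
  else
    PySem.Set.add indices ((PySem.Int.ofStr? part).getD 0 - 1)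

def resolve_pages (pages_spec : Option String) (total_pages : Int) : List Int :=
  match pages_spec with
  | none => PySem.List.pyRange 0 total_pages 1
  | some s =>
    let indices := (((PySem.Str.split? s ",").getD [])).foldl pvStepA PySem.Set.empty
    PySem.List.sorted (indices.filter (fun i => decide (0 ≤ i ∧ i < total_pages))) (fun i => i) false

-- ===== PORT B =====
-- the (lo, hi) half-open interval of one stripped part
def pvLoHi (part : String) : Int × Int :=
  if PySem.Str.isIn "-" part then
    match (PySem.Str.splitMax? part "-" 1).getD [] with
    | [start, end_] => ((PySem.Int.ofStr? start).getD 0 - 1, (PySem.Int.ofStr? end_).getD 0)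
    | _ => (0, 0)         -- unreachable
  else
    let lo := (PySem.Int.ofStr? part).getD 0 - 1
    (lo, lo + 1)

-- one parsing-loop iteration of B: append the part's interval clamped to [0, total_pages), if non-empty
def pvStepIv (total_pages : Int) (acc : List (Int × Int)) (part : String) : List (Int × Int) :=
  let lohi := pvLoHi (PySem.Str.strip part)
  let lo := max lohi.1 0
  let hi := min lohi.2 total_pages
  if lo < hi then acc ++ [(lo, hi)] else acc

-- one sweep iteration of B: emit the unseen portion of the next interval
def pvSweepStep (acc : List Int × Int) (p : Int × Int) : List Int × Int :=
  let start := max p.1 acc.2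
  if start < p.2 then (acc.1 ++ PySem.List.pyRange start p.2 1, p.2) else acc

def resolve_pages_alt (pages_spec : Option String) (total_pages : Int) : List Int :=
  match pages_spec with
  | none => PySem.List.pyRange 0 total_pages 1
  | some s =>
    let intervals := ((PySem.Str.split? s ",").getD []).foldl (pvStepIv total_pages) []
    let sortedIvs := PySem.List.sorted intervals (fun iv => iv.1) false
    (sortedIvs.foldl pvSweepStep ([], 0)).1

-- ===== PRECONDITION & SPEC =====
-- Pre_ excludes exactly the inputs on which Python's int() raises ValueError in A (and in B alike):
-- some comma-part whose stripped form (or a side of its first '-') is not an int literal.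
def pvPartOk (part : String) : Bool :=
  let part := PySem.Str.strip part
  if PySem.Str.isIn "-" part then
    match (PySem.Str.splitMax? part "-" 1).getD [] with
    | [start, end_] => (PySem.Int.ofStr? start).isSome && (PySem.Int.ofStr? end_).isSome
    | _ => true
  else (PySem.Int.ofStr? part).isSome

def Pre_resolve_pages (pages_spec : Option String) (total_pages : Int) : Prop :=
  (pages_spec.map (fun s => (((PySem.Str.split? s ",").getD [])).all pvPartOk)).getD true = true
instance (pages_spec : Option String) (total_pages : Int) : Decidable (Pre_resolve_pages pages_spec total_pages) := by unfold Pre_resolve_pages; infer_instance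

def pvWitness_resolve_pages : Option String × Int := (some "1-3, 5 ,2", 4)

def Spec_resolve_pages (pages_spec : Option String) (total_pages : Int) (out : List Int) : Prop := out = resolve_pages_alt pages_spec total_pages
instance (pages_spec : Option String) (total_pages : Int) (out : List Int) : Decidable (Spec_resolve_pages pages_spec total_pages out) := by unfold Spec_resolve_pages; infer_instance

-- ===== CLAIM (what is proved, stated in full; the proofs are below) =====
def Claim_equal_resolve_pages : Prop := ∀ (pages_spec : Option String) (total_pages : Int), Dom_resolve_pages pages_spec total_pages → Pre_resolve_pages pages_spec total_pages → Spec_resolve_pages pages_spec total_pages (resolve_pages pages_spec total_pages)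

-- ===== LEMMAS AND PROOFS =====

-- membership in one step of A = old set plus the part's interval
lemma memStepA (s0 : PySem.Set Int) (p : String) (i : Int) :
    i ∈ pvStepA s0 p ↔
      i ∈ s0 ∨ ((pvLoHi (PySem.Str.strip p)).1 ≤ i ∧ i < (pvLoHi (PySem.Str.strip p)).2) := by
  unfold pvStepA pvLoHi
  cases h : PySem.Str.isIn "-" (PySem.Str.strip p)
  · simp only [h, Bool.false_eq_true, if_false]
    rw [PySem.Set.mem_add]
    exact or_congr Iff.rfl (by omega)
  · simp only [h, if_true]
    rcases h2 : (PySem.Str.splitMax? (PySem.Str.strip p) "-" 1).getD [] with _ | ⟨a, _ | ⟨b, _ | ⟨c, r⟩⟩⟩ <;>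
      simp [PySem.Set.mem_update, PySem.List.mem_pyRange_one]

-- membership in A's accumulated set = some part's interval contains i
lemma memA (parts : List String) (s0 : PySem.Set Int) (i : Int) :
    i ∈ parts.foldl pvStepA s0 ↔
      i ∈ s0 ∨ ∃ p ∈ parts, (pvLoHi (PySem.Str.strip p)).1 ≤ i ∧ i < (pvLoHi (PySem.Str.strip p)).2 := by
  induction parts generalizing s0 with
  | nil => simp
  | cons p ps ih =>
    simp only [List.foldl_cons, ih, memStepA, List.mem_cons]
    constructor
    · rintro ((h | h) | ⟨q, hq, h⟩)
      · exact Or.inl h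
      · exact Or.inr ⟨p, Or.inl rfl, h⟩
      · exact Or.inr ⟨q, Or.inr hq, h⟩
    · rintro (h | ⟨q, (rfl | hq), h⟩)
      · exact Or.inl (Or.inl h)
      · exact Or.inl (Or.inr h)
      · exact Or.inr ⟨q, hq, h⟩

lemma nodupStepA (s0 : PySem.Set Int) (p : String) (h : s0.Nodup) : (pvStepA s0 p).Nodup := by
  unfold pvStepA
  cases hb : PySem.Str.isIn "-" (PySem.Str.strip p)
  · simp only [hb, Bool.false_eq_true, if_false]
    exact PySem.Set.nodup_add _ _ h
  · simp only [hb, if_true]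
    rcases (PySem.Str.splitMax? (PySem.Str.strip p) "-" 1).getD [] with _ | ⟨a, _ | ⟨b, _ | ⟨c, r⟩⟩⟩ <;>
      first
        | exact h
        | exact PySem.Set.nodup_update _ _ h

lemma nodupA (parts : List String) (s0 : PySem.Set Int) (h : s0.Nodup) :
    (parts.foldl pvStepA s0).Nodup := by
  induction parts generalizing s0 with
  | nil => exact h
  | cons p ps ih => exact ih _ (nodupStepA _ _ h)

-- membership in B's collected interval list
lemma memIv (total : Int) (parts : List String) (acc : List (Int × Int)) (p : Int × Int) :
    p ∈ parts.foldl (pvStepIv total) acc ↔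
      p ∈ acc ∨ ∃ q ∈ parts,
        max (pvLoHi (PySem.Str.strip q)).1 0 < min (pvLoHi (PySem.Str.strip q)).2 total ∧
        p = (max (pvLoHi (PySem.Str.strip q)).1 0, min (pvLoHi (PySem.Str.strip q)).2 total) := by
  induction parts generalizing acc with
  | nil => simp
  | cons q qs ih =>
    simp only [List.foldl_cons, ih, List.mem_cons]
    have hstep : ∀ x : Int × Int, x ∈ pvStepIv total acc q ↔
        x ∈ acc ∨ (max (pvLoHi (PySem.Str.strip q)).1 0 < min (pvLoHi (PySem.Str.strip q)).2 total ∧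
          x = (max (pvLoHi (PySem.Str.strip q)).1 0, min (pvLoHi (PySem.Str.strip q)).2 total)) := by
      intro x
      simp only [pvStepIv]
      split_ifs <;> simp_all
    rw [hstep]
    constructor
    · rintro ((h | h) | ⟨r, hr, h⟩)
      · exact Or.inl h
      · exact Or.inr ⟨q, Or.inl rfl, h⟩
      · exact Or.inr ⟨r, Or.inr hr, h⟩
    · rintro (h | ⟨r, (rfl | hr), h⟩)
      · exact Or.inl (Or.inl h)
      · exact Or.inl (Or.inr h)
      · exact Or.inr ⟨r, hr, h⟩

-- the merging sweep: output stays strictly increasing and holds exactly the union of the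
-- intervals (above cur) plus what was already emitted
lemma sweep (ivs : List (Int × Int)) (res : List Int) (cur : Int)
    (hsorted : ivs.Pairwise (fun a b => a.1 ≤ b.1))
    (hres : res.Pairwise (· < ·)) (hcur : ∀ i ∈ res, i < cur) :
    (ivs.foldl pvSweepStep (res, cur)).1.Pairwise (· < ·) ∧
    ∀ i : Int, i ∈ (ivs.foldl pvSweepStep (res, cur)).1 ↔
      i ∈ res ∨ (cur ≤ i ∧ ∃ p ∈ ivs, p.1 ≤ i ∧ i < p.2) := by
  induction ivs generalizing res cur with
  | nil => exact ⟨hres, by simp⟩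
  | cons p rest ih =>
    rcases hsorted with _ | ⟨hpq, hrest⟩
    simp only [List.foldl_cons]
    unfold pvSweepStep
    by_cases hs : max p.1 cur < p.2
    · simp only [hs, if_true]
      have hres' : (res ++ PySem.List.pyRange (max p.1 cur) p.2 1).Pairwise (· < ·) := by
        rw [List.pairwise_append]
        refine ⟨hres, PySem.List.pairwise_lt_pyRange_one _ _, ?_⟩
        intro a ha b hb
        rw [PySem.List.mem_pyRange_one] at hb
        have := hcur a ha
        omega
      have hcur' : ∀ i ∈ res ++ PySem.List.pyRange (max p.1 cur) p.2 1, i < p.2 := by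
        intro i hi
        rcases List.mem_append.mp hi with h | h
        · have := hcur i h; omega
        · rw [PySem.List.mem_pyRange_one] at h; omega
      obtain ⟨hpw, hmem⟩ := ih _ _ hrest hres' hcur'
      refine ⟨hpw, fun i => (hmem i).trans ?_⟩
      rw [List.mem_append, PySem.List.mem_pyRange_one]
      constructor
      · rintro ((h | h) | ⟨h1, q, hq, h2⟩)
        · exact Or.inl h
        · exact Or.inr ⟨by omega, p, List.mem_cons_self .., by omega⟩
        · exact Or.inr ⟨by omega, q, List.mem_cons_of_mem _ hq, h2⟩
      · rintro (h | ⟨h1, q, hq, h2⟩)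
        · exact Or.inl (Or.inl h)
        · rcases List.mem_cons.mp hq with rfl | hq'
          · exact Or.inl (Or.inr (by omega))
          · by_cases hip : i < p.2
            · have := hpq q hq'
              exact Or.inl (Or.inr (by omega))
            · exact Or.inr ⟨by omega, q, hq', h2⟩
    · simp only [hs, if_false]
      obtain ⟨hpw, hmem⟩ := ih _ _ hrest hres hcur
      refine ⟨hpw, fun i => (hmem i).trans ?_⟩
      constructor
      · rintro (h | ⟨h1, q, hq, h2⟩)
        · exact Or.inl h
        · exact Or.inr ⟨h1, q, List.mem_cons_of_mem _ hq, h2⟩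
      · rintro (h | ⟨h1, q, hq, h2⟩)
        · exact Or.inl h
        · rcases List.mem_cons.mp hq with rfl | hq'
          · exact absurd h2 (by omega)
          · exact Or.inr ⟨h1, q, hq', h2⟩

-- ===== VERDICT (by name: the statement is the Claim_ definition above) =====
theorem resolve_pages_spec : Claim_equal_resolve_pages := by
  intro pages_spec total_pages _hdom _hpre
  unfold Spec_resolve_pages resolve_pages resolve_pages_alt
  cases pages_spec with
  | none => rfl
  | some s =>
    simp only
    set parts := (PySem.Str.split? s ",").getD [] with hparts
    set intervals := parts.foldl (pvStepIv total_pages) [] with hivs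
    set sortedIvs := PySem.List.sorted intervals (fun iv => iv.1) false with hsivs
    obtain ⟨hpw, hmem⟩ := sweep sortedIvs [] 0
      (PySem.List.sorted_pairwise intervals (fun iv => iv.1)) (List.Pairwise.nil) (by simp)
    apply PySem.List.sorted_eq_of_perm_of_pairwise_lt
    · rw [List.perm_ext_iff_of_nodup hpw.nodup
        (List.Nodup.filter _ (nodupA _ _ (by simp [PySem.Set.empty])))]
      intro i
      rw [hmem i, List.mem_filter]
      constructor
      · rintro (h | ⟨h0, p, hp, hc1, hc2⟩)
        · simp at h
        · rw [hsivs, PySem.List.mem_sorted, hivs, memIv] at hp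
          rcases hp with h | ⟨q, hq, hne, rfl⟩
          · simp at h
          · simp only at hc1 hc2
            exact ⟨(memA _ _ _).mpr (Or.inr ⟨q, hq, by omega⟩),
              by simp only [decide_eq_true_eq]; omega⟩
      · rintro ⟨hmemA', hrange⟩
        simp only [decide_eq_true_eq] at hrange
        obtain ⟨q, hq, hcov⟩ := ((memA _ _ _).mp hmemA').resolve_left (by simp [PySem.Set.empty])
        refine Or.inr ⟨by omega, (max (pvLoHi (PySem.Str.strip q)).1 0,
          min (pvLoHi (PySem.Str.strip q)).2 total_pages), ?_, by simp; omega, by simp; omega⟩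
        rw [hsivs, PySem.List.mem_sorted, hivs, memIv]
        exact Or.inr ⟨q, hq, by omega, rfl⟩
    · exact hpw
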